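-- pv_equiv track=rewrite | github.com/oleksandrmelnychenko/bi-server-concord | db-ai-api/training_data/variations/transformers/typo_corrector.py | _fix_missing_chars
-- ===== SOURCE A (Python) =====
-- from typing import List, Dict, Set
--
-- def _fix_missing_chars(word: str, known_words: Set[str]) -> List[str]:
--     """Try adding missing characters based on known words."""
--     results = []
--     # Find similar known words that are 1 char longer
--     for known in known_words:
--         if len(known) == len(word) + 1:
--             # Check if word could be known with 1 char removed
--             for i in range(len(known)):
--                 if known[:i] + known[i + 1:] == word:
--                     results.append(known)
--                     break
--     return results[:3]  # Limit to prevent explosion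
-- ===== SOURCE B (Python) =====
-- from typing import List, Set
--
--
-- def _one_insert_away(word: str, known: str) -> bool:
--     # two-pointer: skip the common prefix, then the rest of known minus one
--     # char must equal the rest of word  (assumes len(known) == len(word) + 1)
--     i = 0
--     n = len(word)
--     while i < n and word[i] == known[i]:
--         i += 1
--     return known[i + 1:] == word[i:]
--
--
-- def _fix_missing_chars(word: str, known_words: Set[str]) -> List[str]:
--     """Try adding missing characters based on known words."""
--     results = []
--     for known in known_words:
--         if len(known) == len(word) + 1 and _one_insert_away(word, known):
--             results.append(known)
--             if len(results) == 3:
--                 break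
--     return results
-- ===== Notes on version B (the rewrite author's own statement) =====
-- stated objective: alternative
-- what changed: Replaces the inner loop over all deletion positions (two fresh slices and a comparison per position) with a single two-pointer one-edit check per candidate, and stops scanning as soon as 3 matches are found instead of collecting all matches and truncating.
import Mathlib
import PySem

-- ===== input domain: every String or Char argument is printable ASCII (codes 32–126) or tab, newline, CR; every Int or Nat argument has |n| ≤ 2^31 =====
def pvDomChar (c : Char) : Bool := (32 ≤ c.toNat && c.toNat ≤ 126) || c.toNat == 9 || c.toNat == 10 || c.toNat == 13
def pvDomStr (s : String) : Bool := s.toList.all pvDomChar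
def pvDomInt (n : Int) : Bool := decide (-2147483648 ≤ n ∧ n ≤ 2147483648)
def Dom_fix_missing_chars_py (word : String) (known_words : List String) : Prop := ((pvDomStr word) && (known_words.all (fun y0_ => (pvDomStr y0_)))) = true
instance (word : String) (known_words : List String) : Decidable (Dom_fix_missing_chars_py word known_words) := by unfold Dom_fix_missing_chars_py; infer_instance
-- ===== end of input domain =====

-- B replaces A's per-word scan over every deletion position (two slices per position) with one
-- two-pointer one-edit check per word and stops scanning after 3 matches (objective: alternative).

-- ===== PORT A =====
-- inner loop of A: 'for i in range(len(known)): if known[:i] + known[i+1:] == word: … break'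
def aScanDel (w kc : List Char) : List Int → Bool
  | [] => false
  | i :: is =>
    if (PySem.List.slice kc none (some i) ++ PySem.List.slice kc (some (i + 1)) none) == w then
      true
    else aScanDel w kc is

def fix_missing_chars_py (word : String) (known_words : List String) : List String :=
  let results := known_words.foldl (fun acc known =>
    if known.toList.length = word.toList.length + 1 then
      if aScanDel word.toList known.toList (PySem.List.pyRange 0 (known.toList.length : Int)) then
        acc ++ [known]
      else acc
    else acc) []
  PySem.List.slice results none (some 3)   -- results[:3]

-- ===== PORT B =====
-- two-pointer: skip the common prefix, then the tail of known minus one char must equal the tail of word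
def oneInsertTP : List Char → List Char → Bool
  | a :: ws, c :: ks => if a == c then oneInsertTP ws ks else ks == (a :: ws)
  | [], _ :: ks => ks == ([] : List Char)
  | _, [] => false

def altGo (w : List Char) : List String → List String → List String
  | [], res => res
  | k :: rest, res =>
    if k.toList.length == w.length + 1 && oneInsertTP w k.toList then
      let res' := res ++ [k]
      if res'.length == 3 then res' else altGo w rest res'
    else altGo w rest res

def fix_missing_chars_py_alt (word : String) (known_words : List String) : List String :=
  altGo word.toList known_words []

-- ===== PRECONDITION & SPEC =====
def Spec_fix_missing_chars_py (word : String) (known_words : List String) (out : List String) : Prop := out = fix_missing_chars_py_alt word known_words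
instance (word : String) (known_words : List String) (out : List String) : Decidable (Spec_fix_missing_chars_py word known_words out) := by unfold Spec_fix_missing_chars_py; infer_instance

-- ===== CLAIM (what is proved, stated in full; the proofs are below) =====
def Claim_equal_fix_missing_chars_py : Prop := ∀ (word : String) (known_words : List String), Dom_fix_missing_chars_py word known_words → Spec_fix_missing_chars_py word known_words (fix_missing_chars_py word known_words)

-- ===== LEMMAS AND PROOFS =====

-- A's inner loop is an 'any' over the index list
theorem aScanDel_eq_any (w kc : List Char) (is : List Int) :
    aScanDel w kc is =
      is.any (fun i => (PySem.List.slice kc none (some i) ++ PySem.List.slice kc (some (i + 1)) none) == w) := by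
  induction is with
  | nil => rfl
  | cons i is ih =>
    by_cases h : (PySem.List.slice kc none (some i) ++ PySem.List.slice kc (some (i + 1)) none) == w
    · simp [aScanDel, h]
    · simp [aScanDel, h, ih]

-- the deletion scan over all positions agrees with the two-pointer check when len known = len word + 1
theorem any_del_eq_tp (w : List Char) : ∀ kc : List Char, kc.length = w.length + 1 →
    ((List.range kc.length).any (fun i => (kc.take i ++ kc.drop (i + 1)) == w)) = oneInsertTP w kc := by
  induction w with
  | nil =>
    intro kc h
    match kc, h with
    | [c], _ => simp [oneInsertTP]
  | cons a ws ih =>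
    intro kc h
    match kc with
    | c :: ks =>
      have hks : ks.length = ws.length + 1 := by simpa using h
      have hrange : List.range (c :: ks).length = 0 :: (List.range ks.length).map (· + 1) := by
        simp [List.range_succ_eq_map]
      rw [hrange]
      simp only [List.any_cons, List.any_map, Function.comp_def, List.take_zero,
        List.nil_append, List.drop_succ_cons, List.drop_zero, List.take_succ_cons,
        List.cons_append, List.cons_beq_cons]
      by_cases hac : a = c
      · subst hac
        simp only [beq_self_eq_true, Bool.true_and]
        rw [ih ks hks]
        simp only [oneInsertTP, beq_self_eq_true]
        cases hk : (ks == a :: ws) with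
        | false => simp
        | true =>
          have hk' : ks = a :: ws := by simpa using hk
          subst hk'
          rw [Bool.true_or, ← ih (a :: ws) (by simp)]
          symm
          apply List.any_eq_true.mpr
          exact ⟨0, by simp, by simp⟩
      · have hca : (c == a) = false := by simp [Ne.symm hac]
        have hac' : (a == c) = false := by simp [hac]
        simp [oneInsertTP, hca, hac']

-- A's inner loop over pyRange equals the two-pointer check (when the lengths fit)
theorem aScan_eq_tp (w kc : List Char) (h : kc.length = w.length + 1) :
    aScanDel w kc (PySem.List.pyRange 0 (kc.length : Int)) = oneInsertTP w kc := by
  rw [aScanDel_eq_any, PySem.List.pyRange_zero_natCast, List.any_map]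
  have hfun : ((fun i : Int => (PySem.List.slice kc none (some i) ++ PySem.List.slice kc (some (i + 1)) none) == w) ∘ fun k : Nat => (k : Int))
      = (fun i : Nat => (kc.take i ++ kc.drop (i + 1)) == w) := by
    funext i
    simp only [Function.comp_apply]
    rw [PySem.List.slice_to_natCast, show ((i : Int) + 1) = ((i + 1 : Nat) : Int) by push_cast; ring,
      PySem.List.slice_from_natCast]
  rw [hfun, any_del_eq_tp w kc h]

-- B's loop with its break-at-3 collects take 3 of the filtered candidates
theorem altGo_eq (w : List Char) (ks : List String) : ∀ res : List String, res.length < 3 →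
    altGo w ks res = (res ++ ks.filter (fun k => k.toList.length == w.length + 1 && oneInsertTP w k.toList)).take 3 := by
  induction ks with
  | nil =>
    intro res h
    simp only [altGo, List.filter_nil, List.append_nil]
    exact (List.take_of_length_le (by omega)).symm
  | cons k rest ih =>
    intro res h
    by_cases hp : (k.toList.length == w.length + 1 && oneInsertTP w k.toList) = true
    · rw [List.filter_cons, if_pos hp]
      simp only [altGo, hp, if_pos]
      by_cases h3 : (res ++ [k]).length = 3
      · rw [if_pos (by simpa using h3)]
        rw [show res ++ k :: List.filter (fun k => k.toList.length == w.length + 1 && oneInsertTP w k.toList) rest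
              = (res ++ [k]) ++ List.filter (fun k => k.toList.length == w.length + 1 && oneInsertTP w k.toList) rest by simp]
        rw [← h3, List.take_left]
      · rw [if_neg (by simpa using h3)]
        rw [ih (res ++ [k]) (by simp at h3 ⊢; omega)]
        simp
    · rw [List.filter_cons, if_neg hp]
      simp only [altGo, hp]
      exact ih res h

-- ===== VERDICT (by name: the statement is the Claim_ definition above) =====
theorem fix_missing_chars_py_spec : Claim_equal_fix_missing_chars_py := by
  intro word knowns _
  unfold Spec_fix_missing_chars_py fix_missing_chars_py fix_missing_chars_py_alt
  rw [altGo_eq word.toList knowns [] (by simp)]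
  simp only [List.nil_append]
  have hfold : (fun (acc : List String) known =>
      if known.toList.length = word.toList.length + 1 then
        if aScanDel word.toList known.toList (PySem.List.pyRange 0 (known.toList.length : Int)) then acc ++ [known] else acc
      else acc)
      = (fun (acc : List String) x =>
        if (x.toList.length == word.toList.length + 1 && oneInsertTP word.toList x.toList) = true then acc ++ [id x] else acc) := by
    funext acc k
    by_cases h1 : k.toList.length = word.toList.length + 1
    · rw [if_pos h1, aScan_eq_tp word.toList k.toList h1]
      by_cases h2 : oneInsertTP word.toList k.toList = true
      · rw [if_pos h2, if_pos (by simp only [Bool.and_eq_true, beq_iff_eq]; exact ⟨h1, h2⟩)]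
        rfl
      · rw [if_neg h2, if_neg (by simp only [Bool.and_eq_true, beq_iff_eq]; exact fun hc => h2 hc.2)]
    · rw [if_neg h1, if_neg (by simp only [Bool.and_eq_true, beq_iff_eq]; exact fun hc => h1 hc.1)]
  rw [hfold, PySem.List.foldl_append_if _ id knowns []]
  simp only [List.map_id, List.nil_append]
  rw [PySem.List.slice_to _ (by norm_num : (0:Int) ≤ 3)]
  rfl
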